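-- pv_equiv track=rewrite | github.com/SamuelParrales/Seguridad-Informatica | Criptografía clásica/escitala.py | desenrrollarCinta
-- ===== SOURCE A (Python) =====
-- def desenrrollarCinta(M):
--     filas = len(M)
--     columnas = len(M[0])
--     cripto = ""
--     for j in range(columnas):
--         for i in range(filas):
--             cripto +=M[i][j]
--     return cripto
-- ===== SOURCE B (Python) =====
-- def desenrrollarCinta(M):
--     columnas = len(M[0])
--     cols = [[] for _ in range(columnas)]
--     for row in M:
--         for j in range(columnas):
--             cols[j].append(row[j])
--     return ''.join(''.join(c) for c in cols)
-- ===== Notes on version B (the rewrite author's own statement) =====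
-- stated objective: alternative
-- what changed: Instead of column-major index arithmetic (nested range loops accumulating one string via +=), B makes a single row-major pass distributing each row's entries into per-column buckets (an explicit transpose) and joins the buckets once.
import Mathlib
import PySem

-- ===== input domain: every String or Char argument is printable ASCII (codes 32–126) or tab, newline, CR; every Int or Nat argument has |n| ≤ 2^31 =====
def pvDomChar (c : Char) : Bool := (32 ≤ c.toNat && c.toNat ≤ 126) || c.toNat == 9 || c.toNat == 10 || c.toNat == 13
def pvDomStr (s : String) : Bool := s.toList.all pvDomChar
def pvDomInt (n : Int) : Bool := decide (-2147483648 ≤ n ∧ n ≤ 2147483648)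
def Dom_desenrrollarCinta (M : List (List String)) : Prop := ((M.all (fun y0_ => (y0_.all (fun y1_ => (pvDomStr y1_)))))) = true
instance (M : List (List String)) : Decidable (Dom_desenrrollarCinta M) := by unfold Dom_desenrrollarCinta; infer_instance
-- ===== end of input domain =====

-- B replaces A's column-major nested index loops by a row-major pass building per-column buckets (an explicit transpose), joined once: alternative data structure, same cost.


-- ===== PORT A =====
-- string += is ported exactly over List Char (Lean's own String.append is kernel-opaque), wrapped once at the end
def desenrrollarCinta (M : List (List String)) : String :=
  let filas : Int := M.length
  let columnas : Int := (PySem.List.pyGetD M 0 []).length   -- len(M[0]); pyGetD's default only reached outside Pre_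
  let cripto : List Char :=
    (PySem.List.pyRange 0 columnas 1).foldl (fun cripto j =>
      (PySem.List.pyRange 0 filas 1).foldl (fun cripto i =>
        cripto ++ (PySem.List.pyGetD (PySem.List.pyGetD M i []) j "").toList) cripto) []
  String.ofList cripto

-- ===== PORT B =====
-- 'for j in range(columnas): cols[j].append(row[j])' over the length-columnas bucket list is exactly zipWith snoc with row.take columnas;
-- ''.join is ported exactly as flatten over List Char
def desenrrollarCinta_alt (M : List (List String)) : String :=
  let columnas : Nat := (PySem.List.pyGetD M 0 []).length
  let cols : List (List String) :=
    M.foldl (fun cols row => List.zipWith (fun c x => c ++ [x]) cols (row.take columnas))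
      (List.replicate columnas [])
  String.ofList ((cols.map (fun c => (c.map String.toList).flatten)).flatten)

-- ===== PRECONDITION & SPEC =====
-- Pre_ excludes exactly the inputs where Python A raises IndexError: the empty matrix (len(M[0])) and matrices with a row shorter than the first row (M[i][j])
def Pre_desenrrollarCinta (M : List (List String)) : Prop :=
  M ≠ [] ∧ ∀ row ∈ M, (M.headD []).length ≤ row.length
instance (M : List (List String)) : Decidable (Pre_desenrrollarCinta M) := by
  unfold Pre_desenrrollarCinta; infer_instance
def pvWitness_desenrrollarCinta : List (List String) := [["a","b"],["c","d"]]

def Spec_desenrrollarCinta (M : List (List String)) (out : String) : Prop := out = desenrrollarCinta_alt M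
instance (M : List (List String)) (out : String) : Decidable (Spec_desenrrollarCinta M out) := by unfold Spec_desenrrollarCinta; infer_instance

-- ===== CLAIM (what is proved, stated in full; the proofs are below) =====
def Claim_equal_desenrrollarCinta : Prop := ∀ (M : List (List String)), Dom_desenrrollarCinta M → Pre_desenrrollarCinta M → Spec_desenrrollarCinta M (desenrrollarCinta M)

-- ===== LEMMAS AND PROOFS =====

-- zipWith snoc of a range-map with a length-n list, elementwise
theorem pv_zipWith_map_range (n : Nat) (f : Nat → List String) (ys : List String) (hy : ys.length = n) :
    List.zipWith (fun c x => c ++ [x]) ((List.range n).map f) ys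
      = (List.range n).map (fun j => f j ++ [ys.getD j ""]) := by
  apply List.ext_getElem
  · simp [hy]
  · intro j h1 h2
    simp at h1 h2
    simp [List.getElem_zipWith, hy, h2]

-- invariant of B's row-major fold: the buckets hold column j of the processed rows
theorem pv_foldB (n : Nat) (M : List (List String)) (h : ∀ row ∈ M, n ≤ row.length)
    (f : Nat → List String) :
    M.foldl (fun cols row => List.zipWith (fun c x => c ++ [x]) cols (row.take n))
        ((List.range n).map f)
      = (List.range n).map (fun j => f j ++ M.map (fun row => row.getD j "")) := by
  induction M generalizing f with
  | nil => simp
  | cons r M ih =>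
    have hr : n ≤ r.length := h r (by simp)
    have hM : ∀ row ∈ M, n ≤ row.length := fun row hrow => h row (by simp [hrow])
    simp only [List.foldl_cons]
    rw [pv_zipWith_map_range n f (r.take n) (by simp [hr]),
        ih hM (fun j => f j ++ [(r.take n).getD j ""])]
    apply List.map_congr_left
    intro j hj
    simp at hj
    have : (r.take n).getD j "" = r.getD j "" := by
      simp [List.getD_eq_getElem?_getD, hj]
    rw [this]
    simp

-- A's inner loop over rows, for a fixed column j
theorem pv_innerA (M : List (List String)) (j : Int) (acc : List Char) :
    (PySem.List.pyRange 0 (M.length : Int) 1).foldl (fun cripto i =>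
        cripto ++ (PySem.List.pyGetD (PySem.List.pyGetD M i []) j "").toList) acc
      = acc ++ (M.map (fun row => (PySem.List.pyGetD row j "").toList)).flatten := by
  rw [PySem.List.foldl_pyRange_zero_pyGetD' M [] (fun cripto row => cripto ++ (PySem.List.pyGetD row j "").toList) acc]
  induction M generalizing acc with
  | nil => simp
  | cons r M ih => simp [ih]

theorem desenrrollarCinta_eq (M : List (List String)) (h : Pre_desenrrollarCinta M) :
    desenrrollarCinta M = desenrrollarCinta_alt M := by
  obtain ⟨hne, hlen⟩ := h
  obtain ⟨r, M', rfl⟩ := List.exists_cons_of_ne_nil hne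
  simp only [List.headD_cons] at hlen
  unfold desenrrollarCinta desenrrollarCinta_alt
  dsimp only
  have hget0 : PySem.List.pyGetD (r :: M') 0 [] = r := by
    simp [PySem.List.pyGetD, PySem.List.pyGet?, PySem.List.pyIdx?]
  rw [hget0]
  set n := r.length with hn
  congr 1
  -- A side: turn the outer pyRange loop into a flatten over List.range n
  have hA : ∀ (acc : List Char) (m : Nat),
      (PySem.List.pyRange 0 (m : Int) 1).foldl (fun cripto j =>
        (PySem.List.pyRange 0 (((r :: M').length : Nat) : Int) 1).foldl (fun cripto i =>
          cripto ++ (PySem.List.pyGetD (PySem.List.pyGetD (r :: M') i []) j "").toList) cripto) acc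
      = acc ++ ((List.range m).map (fun j =>
          ((r :: M').map (fun row => (row.getD j "").toList)).flatten)).flatten := by
    intro acc m
    induction m generalizing acc with
    | zero => simp
    | succ m ihm =>
      have : ((m + 1 : Nat) : Int) = (m : Int) + 1 := by push_cast; ring
      rw [this, PySem.List.pyRange_one_succ_right (by positivity), List.foldl_append]
      rw [ihm]
      simp only [List.foldl_cons, List.foldl_nil]
      rw [pv_innerA (r :: M') (m : Int)]
      have : ∀ row : List String, PySem.List.pyGetD row (m : Int) "" = row.getD m "" :=
        fun row => PySem.List.pyGetD_natCast row m ""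
      simp [List.range_succ, this]
  have := hA [] n
  simp only [List.nil_append] at this
  -- note len (r :: M') as Int: ports write (M.length : Int)
  rw [show ((r :: M').length : Int) = (((r :: M').length : Nat) : Int) from rfl] at *
  rw [this]
  -- B side
  have hrep : (List.replicate n ([] : List String)) = (List.range n).map (fun _ => []) := by
    simp [List.map_const']
  rw [hrep, pv_foldB n (r :: M') (by simpa [hn] using hlen) (fun _ => [])]
  simp
  congr 1
  apply List.map_congr_left
  intro j hj
  simp [Function.comp_def]

-- ===== VERDICT (by name: the statement is the Claim_ definition above) =====
theorem desenrrollarCinta_spec : Claim_equal_desenrrollarCinta := by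
  intro M _ hpre
  unfold Spec_desenrrollarCinta
  exact desenrrollarCinta_eq M hpre
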